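-- pv_equiv track=rewrite | github.com/cthulhustig/autojimmy | gui/diceroller/dicerollresultswidget.py | _calculateMaxDieSize
-- ===== SOURCE A (Python) =====
-- import typing
--
-- def _calculateMaxDieSize(
--         width: int,
--         height: int,
--         dieCount: int
--         ) -> typing.Tuple[
--             int, # x count
--             int, # y count
--             int]: # size
--     """Calculate the maximum size of squares that can fit into the rectangle."""
--     bestSize = 0
--     bestLayout = []
--
--     for xCount in range(1, dieCount + 1):
--         yCount = (dieCount + xCount - 1) // xCount  # Compute number of rows needed to fit `x` squares
--
--         # Ensure the configuration fits within the rectangle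
--         if xCount * yCount >= dieCount:
--             # Calculate square size
--             s = min(width // xCount, height // yCount)
--
--             if s > bestSize:
--                 bestSize = s
--                 bestLayout = (xCount, yCount)
--
--     if not bestLayout:
--         # The available area isn't big enough for the dice. This is
--         # known to occur if width or height are 0. Position all dice
--         # in a line with a size of 0
--         return (1, dieCount, 0) if width < height else (dieCount, 1, 0)
--
--     return (bestLayout[0], bestLayout[1], int(bestSize))
-- ===== SOURCE B (Python) =====
-- def _calculateMaxDieSize(width, height, dieCount):
--     """Divisor-block version: width//x and the row count ceil(dieCount/x) are
--     piecewise constant in x, so we evaluate one x per constant block and jump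
--     to the next block, keeping the earliest strict maximum like the full scan."""
--     if width <= 0 or height <= 0 or dieCount <= 0:
--         return (1, dieCount, 0) if width < height else (dieCount, 1, 0)
--     bestSize = 0
--     bestLayout = (0, 0)
--     x = 1
--     while x <= dieCount:
--         q = (dieCount + x - 1) // x  # rows needed; constant on the whole block
--         s = min(width // x, height // q)
--         if s > bestSize:
--             bestSize = s
--             bestLayout = (x, q)
--         v = width // x
--         e1 = width // v if v > 0 else dieCount       # last x with the same width//x
--         e2 = (dieCount - 1) // (q - 1) if q > 1 else dieCount  # last x with the same q
--         x = min(e1, e2) + 1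
--     if bestSize == 0:
--         return (1, dieCount, 0) if width < height else (dieCount, 1, 0)
--     return (bestLayout[0], bestLayout[1], bestSize)
-- ===== Notes on version B (the rewrite author's own statement) =====
-- stated objective: faster
-- what changed: Instead of trying every xCount from 1 to dieCount, B enumerates only the O(sqrt(width)+sqrt(dieCount)) blocks of x on which width//x and ceil(dieCount/x) are both constant, evaluating one representative per block and jumping to the next block, which preserves the earliest strict maximum.
import Mathlib
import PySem

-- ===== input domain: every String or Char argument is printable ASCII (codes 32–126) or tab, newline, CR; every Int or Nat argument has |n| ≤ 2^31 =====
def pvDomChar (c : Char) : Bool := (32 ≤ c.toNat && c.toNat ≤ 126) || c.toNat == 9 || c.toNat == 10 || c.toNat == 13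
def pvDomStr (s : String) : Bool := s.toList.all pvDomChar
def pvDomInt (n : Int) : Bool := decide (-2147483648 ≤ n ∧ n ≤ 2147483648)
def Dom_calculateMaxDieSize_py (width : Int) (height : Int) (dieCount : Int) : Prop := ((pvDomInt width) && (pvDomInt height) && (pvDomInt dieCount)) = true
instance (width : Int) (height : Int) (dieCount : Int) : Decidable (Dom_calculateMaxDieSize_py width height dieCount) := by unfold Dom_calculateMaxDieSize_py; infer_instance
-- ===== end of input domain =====

-- B replaces A's scan over every xCount with an enumeration of the O(√width+√dieCount) blocks on
-- which width//x and ceil(dieCount/x) are constant, jumping block to block (measured asymptotically faster).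


-- ===== PORT A =====
def calculateMaxDieSize_py (width : Int) (height : Int) (dieCount : Int) : List Int :=
  let st := (PySem.List.pyRange 1 (dieCount + 1) 1).foldl
    (fun (st : Int × List Int) xCount =>
      let yCount := PySem.Int.floordiv (dieCount + xCount - 1) xCount
      if dieCount ≤ xCount * yCount then
        let s := min (PySem.Int.floordiv width xCount) (PySem.Int.floordiv height yCount)
        if st.1 < s then (s, [xCount, yCount]) else st
      else st) (0, ([] : List Int))
  if st.2 = [] then
    if width < height then [1, dieCount, 0] else [dieCount, 1, 0]
  else
    -- bestLayout has exactly 2 elements whenever this branch is reached, so the indexing is in range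
    [PySem.List.pyGetD st.2 0 0, PySem.List.pyGetD st.2 1 0, st.1]

-- ===== PORT B =====
-- local variables q / s / e1 / e2 of Source B's loop body, as functions of the loop counter x
def qval (n x : Int) : Int := PySem.Int.floordiv (n + x - 1) x
def fval (w h n x : Int) : Int := min (PySem.Int.floordiv w x) (PySem.Int.floordiv h (qval n x))
def e1fun (w n x : Int) : Int :=
  if 0 < PySem.Int.floordiv w x then PySem.Int.floordiv w (PySem.Int.floordiv w x) else n
def e2fun (n x : Int) : Int :=
  if 1 < qval n x then PySem.Int.floordiv (n - 1) (qval n x - 1) else n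

-- the port's termination argument: each jump moves x strictly forward
lemma floordiv_bounds (a b : Int) (hb : 0 < b) :
    PySem.Int.floordiv a b * b ≤ a ∧ a < (PySem.Int.floordiv a b + 1) * b :=
  (PySem.Int.floordiv_eq_iff_of_pos hb).mp rfl

lemma blockEnd_ge (w n x : Int) (hx : 1 ≤ x) (hxn : x ≤ n) :
    x ≤ min (e1fun w n x) (e2fun n x) := by
  have hq := floordiv_bounds (n + x - 1) x (by omega)
  refine le_min ?_ ?_
  · unfold e1fun
    split_ifs with hv
    · have hb := floordiv_bounds w x (by omega)
      rw [PySem.Int.le_floordiv_iff_mul_le hv]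
      nlinarith [hb.1]
    · omega
  · unfold e2fun qval at *
    split_ifs with hq1
    · rw [PySem.Int.le_floordiv_iff_mul_le (by omega)]
      nlinarith [hq.1]
    · omega

-- while loop of Source B; the positivity arguments only justify termination
def altLoop (w n h x : Int) (best : Int × Int × Int) (hx : 1 ≤ x) :
    Int × Int × Int :=
  if hle : x ≤ n then
    altLoop w n h (min (e1fun w n x) (e2fun n x) + 1)
      (if best.1 < fval w h n x then (fval w h n x, x, qval n x) else best)
      (by have := blockEnd_ge w n x hx hle; omega)
  else best
termination_by (n + 1 - x).toNat
decreasing_by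
  have := blockEnd_ge w n x hx hle
  omega

def calculateMaxDieSize_py_alt (width : Int) (height : Int) (dieCount : Int) : List Int :=
  if h0 : width ≤ 0 ∨ height ≤ 0 ∨ dieCount ≤ 0 then
    if width < height then [1, dieCount, 0] else [dieCount, 1, 0]
  else
    let bst := altLoop width dieCount height 1 (0, 0, 0) (by omega)
    if bst.1 = 0 then
      if width < height then [1, dieCount, 0] else [dieCount, 1, 0]
    else [bst.2.1, bst.2.2, bst.1]

-- ===== PRECONDITION & SPEC =====
def Spec_calculateMaxDieSize_py (width : Int) (height : Int) (dieCount : Int) (out : List Int) : Prop := out = calculateMaxDieSize_py_alt width height dieCount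
instance (width : Int) (height : Int) (dieCount : Int) (out : List Int) : Decidable (Spec_calculateMaxDieSize_py width height dieCount out) := by unfold Spec_calculateMaxDieSize_py; infer_instance

-- ===== CLAIM (what is proved, stated in full; the proofs are below) =====
def Claim_equal_calculateMaxDieSize_py : Prop := ∀ (width : Int) (height : Int) (dieCount : Int), Dom_calculateMaxDieSize_py width height dieCount → Spec_calculateMaxDieSize_py width height dieCount (calculateMaxDieSize_py width height dieCount)

-- ===== LEMMAS AND PROOFS =====

-- A's loop body, named
def stepA (w h n : Int) (st : Int × List Int) (x : Int) : Int × List Int :=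
  let y := PySem.Int.floordiv (n + x - 1) x
  if n ≤ x * y then
    let s := min (PySem.Int.floordiv w x) (PySem.Int.floordiv h y)
    if st.1 < s then (s, [x, y]) else st
  else st

lemma portA_eq (w h n : Int) :
    calculateMaxDieSize_py w h n =
      (let st := (PySem.List.pyRange 1 (n + 1) 1).foldl (stepA w h n) (0, ([] : List Int))
       if st.2 = [] then
         if w < h then [1, n, 0] else [n, 1, 0]
       else [PySem.List.pyGetD st.2 0 0, PySem.List.pyGetD st.2 1 0, st.1]) := rfl

-- the guard xCount*yCount >= dieCount always holds for xCount ≥ 1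
lemma stepA_eq (w h n x : Int) (hx : 1 ≤ x) (st : Int × List Int) :
    stepA w h n st x = if st.1 < fval w h n x then (fval w h n x, [x, qval n x]) else st := by
  have hq := floordiv_bounds (n + x - 1) x (by omega)
  unfold stepA fval qval
  rw [if_pos (by nlinarith [hq.2])]

lemma fval_le_step (w h n x : Int) (hx : 1 ≤ x) (st : Int × List Int) :
    fval w h n x ≤ (stepA w h n st x).1 := by
  rw [stepA_eq w h n x hx]
  split_ifs with hlt
  · simp
  · omega

-- skipping the rest of a constant block is a no-op
lemma foldl_noop (w h n : Int) (xs : List Int) (st : Int × List Int)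
    (hxs : ∀ x ∈ xs, 1 ≤ x ∧ fval w h n x ≤ st.1) :
    xs.foldl (stepA w h n) st = st := by
  induction xs with
  | nil => rfl
  | cons a t ih =>
    have ha := hxs a List.mem_cons_self
    have hstep : stepA w h n st a = st := by
      rw [stepA_eq w h n a ha.1, if_neg (by omega)]
    simp only [List.foldl_cons, hstep]
    exact ih fun x hx => hxs x (List.mem_cons_of_mem _ hx)

-- width // x' is constant on the block
lemma const_w (w n x x' : Int) (hw : 1 ≤ w) (hx : 1 ≤ x) (hle : x ≤ x') (hend : x' ≤ e1fun w n x) :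
    PySem.Int.floordiv w x' = PySem.Int.floordiv w x := by
  have hb := floordiv_bounds w x (by omega)
  unfold e1fun at hend
  split_ifs at hend with hv
  · have hb2 := floordiv_bounds w (PySem.Int.floordiv w x) hv
    rw [PySem.Int.floordiv_eq_iff_of_pos (by omega)]
    constructor
    · nlinarith [hb2.1]
    · nlinarith [hb.2]
  · have h0 : PySem.Int.floordiv w x = 0 := by
      have : 0 ≤ PySem.Int.floordiv w x := by
        rw [PySem.Int.le_floordiv_iff_mul_le (by omega)]; omega
      omega
    rw [h0, PySem.Int.floordiv_eq_iff_of_pos (by omega)]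
    constructor
    · omega
    · nlinarith [hb.2, h0]

-- ceil(dieCount / x') is constant on the block
lemma const_q (n x x' : Int) (hn : 1 ≤ n) (hx : 1 ≤ x) (hle : x ≤ x') (hend : x' ≤ e2fun n x) :
    qval n x' = qval n x := by
  have hb := floordiv_bounds (n + x - 1) x (by omega)
  unfold e2fun at hend
  unfold qval at *
  have hq1 : 1 ≤ PySem.Int.floordiv (n + x - 1) x := by
    rw [PySem.Int.le_floordiv_iff_mul_le (by omega)]; omega
  split_ifs at hend with hgt
  · have hb2 := floordiv_bounds (n - 1) (PySem.Int.floordiv (n + x - 1) x - 1) (by omega)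
    rw [PySem.Int.floordiv_eq_iff_of_pos (by omega)]
    constructor
    · nlinarith [hb2.1]
    · nlinarith [hb.2]
  · have hq : PySem.Int.floordiv (n + x - 1) x = 1 := by omega
    have hnx : n ≤ x := by nlinarith [hb.2, hq]
    rw [hq, PySem.Int.floordiv_eq_iff_of_pos (by omega)]
    omega

-- relation between A's loop state (bestSize, bestLayout) and B's (bestSize, x, q)
def InvAB (st : Int × List Int) (bst : Int × Int × Int) : Prop :=
  st.1 = bst.1 ∧ 0 ≤ st.1 ∧ (st.1 = 0 → st.2 = []) ∧ (0 < st.1 → st.2 = [bst.2.1, bst.2.2])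

lemma step_invAB (w h n x : Int) (hx : 1 ≤ x) (st : Int × List Int) (bst : Int × Int × Int)
    (hI : InvAB st bst) :
    InvAB (stepA w h n st x)
      (if bst.1 < fval w h n x then (fval w h n x, x, qval n x) else bst) := by
  obtain ⟨h1, h2, h3, h4⟩ := hI
  rw [stepA_eq w h n x hx, h1]
  split_ifs with hlt
  · exact ⟨rfl, by omega, by omega, fun _ => rfl⟩
  · exact ⟨h1, h2, h3, h4⟩

lemma main_loop (w h n : Int) (hw : 1 ≤ w) (hn : 1 ≤ n) :
    ∀ (k : Nat) (x : Int) (hx : 1 ≤ x) (st : Int × List Int) (bst : Int × Int × Int),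
      (n + 1 - x).toNat ≤ k → InvAB st bst →
      InvAB ((PySem.List.pyRange x (n + 1) 1).foldl (stepA w h n) st)
        (altLoop w n h x bst hx) := by
  intro k
  induction k with
  | zero =>
    intro x hx st bst hk hI
    rw [PySem.List.pyRange_one_eq_nil (by omega), altLoop, dif_neg (by omega)]
    exact hI
  | succ k ih =>
    intro x hx st bst hk hI
    by_cases hle : x ≤ n
    · have hblk := blockEnd_ge w n x hx hle
      set m := min (e1fun w n x) (e2fun n x) with hm
      have hconst : ∀ x', x ≤ x' → x' ≤ m → fval w h n x' = fval w h n x := by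
        intro x' h1 h2
        unfold fval
        rw [const_w w n x x' hw hx h1 (le_trans h2 (min_le_left _ _)),
            const_q n x x' hn hx h1 (le_trans h2 (min_le_right _ _))]
      have hI1 := step_invAB w h n x hx st bst hI
      have hge : fval w h n x ≤ (stepA w h n st x).1 := fval_le_step w h n x hx st
      rw [altLoop, dif_pos hle]
      by_cases hmn : n ≤ m
      · rw [PySem.List.pyRange_one_cons (by omega), List.foldl_cons]
        have hnoop : (PySem.List.pyRange (x+1) (n+1) 1).foldl (stepA w h n) (stepA w h n st x)
            = stepA w h n st x := by
          apply foldl_noop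
          intro x' hx'
          have := (PySem.List.mem_pyRange_one).mp hx'
          refine ⟨by omega, ?_⟩
          rw [hconst x' (by omega) (by omega)]
          exact hge
        rw [hnoop, altLoop, dif_neg (by omega)]
        exact hI1
      · rw [PySem.List.pyRange_one_append x (m+1) (n+1) (by omega) (by omega),
            List.foldl_append,
            PySem.List.pyRange_one_cons (show x < m+1 by omega), List.foldl_cons]
        have hnoop : (PySem.List.pyRange (x+1) (m+1) 1).foldl (stepA w h n) (stepA w h n st x)
            = stepA w h n st x := by
          apply foldl_noop
          intro x' hx'
          have := (PySem.List.mem_pyRange_one).mp hx'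
          refine ⟨by omega, ?_⟩
          rw [hconst x' (by omega) (by omega)]
          exact hge
        rw [hnoop]
        exact ih (m+1) (by omega) _ _ (by omega) hI1
    · rw [PySem.List.pyRange_one_eq_nil (by omega), altLoop, dif_neg hle]
      exact hI

theorem main_thm (w h n : Int) : calculateMaxDieSize_py w h n = calculateMaxDieSize_py_alt w h n := by
  rw [portA_eq]
  unfold calculateMaxDieSize_py_alt
  by_cases h0 : w ≤ 0 ∨ h ≤ 0 ∨ n ≤ 0
  · rw [dif_pos h0]
    have hnoop : (PySem.List.pyRange 1 (n+1) 1).foldl (stepA w h n) (0, ([] : List Int)) = (0, []) := by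
      apply foldl_noop
      intro x hx
      have hxm := (PySem.List.mem_pyRange_one).mp hx
      refine ⟨by omega, ?_⟩
      have hq1 : 1 ≤ qval n x := by
        unfold qval
        rw [PySem.Int.le_floordiv_iff_mul_le (by omega)]
        omega
      rcases h0 with hw0 | hh0 | hn0
      · have : PySem.Int.floordiv w x < 1 := by
          rw [PySem.Int.floordiv_lt_iff_lt_mul (by omega)]
          omega
        calc fval w h n x ≤ PySem.Int.floordiv w x := min_le_left _ _
          _ ≤ 0 := by omega
      · have : PySem.Int.floordiv h (qval n x) < 1 := by
          rw [PySem.Int.floordiv_lt_iff_lt_mul (by omega)]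
          omega
        calc fval w h n x ≤ PySem.Int.floordiv h (qval n x) := min_le_right _ _
          _ ≤ 0 := by omega
      · omega
    simp [hnoop]
  · rw [dif_neg h0]
    have hI := main_loop w h n (by omega) (by omega) (n + 1 - 1).toNat 1 (by omega)
      (0, ([] : List Int)) (0, 0, 0) (by omega)
      ⟨rfl, by norm_num, fun _ => rfl, by norm_num⟩
    obtain ⟨e1, e2, e3, e4⟩ := hI
    by_cases hz : ((PySem.List.pyRange 1 (n + 1) 1).foldl (stepA w h n) (0, ([] : List Int))).1 = 0
    · simp only [e3 hz, ← e1, hz]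
      simp
    · have hpos : 0 < ((PySem.List.pyRange 1 (n + 1) 1).foldl (stepA w h n) (0, ([] : List Int))).1 := by omega
      have h2 := e4 hpos
      simp only [h2, ← e1]
      simp [PySem.List.pyGetD, hz]

-- ===== VERDICT (by name: the statement is the Claim_ definition above) =====
theorem calculateMaxDieSize_py_spec : Claim_equal_calculateMaxDieSize_py := by
  intro w h n _
  unfold Spec_calculateMaxDieSize_py
  exact main_thm w h n
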